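-- pv_equiv track=rewrite | github.com/asmith-nhsx/adventofcode | aoc2021/q12-p1/puzzle.py | countSmall
-- ===== SOURCE A (Python) =====
-- def countSmall(path):
--
--     small = []
--     for s in [p for p in path.split(',') if p == p.lower() and p != 'start']:
--         if s not in small:
--             small.append(s)
--         else:
--             return False
--     return True
-- ===== SOURCE B (Python) =====
-- def countSmall(path):
--     smalls = [p for p in path.split(',') if p == p.lower() and p != 'start']
--     return len(smalls) == len(set(smalls))
-- ===== Notes on version B (the rewrite author's own statement) =====
-- stated objective: simpler
-- what changed: Replaces the incremental seen-list loop with its per-element membership test and early return by building the filtered token list once and comparing its length with the length of its set.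
import Mathlib
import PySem

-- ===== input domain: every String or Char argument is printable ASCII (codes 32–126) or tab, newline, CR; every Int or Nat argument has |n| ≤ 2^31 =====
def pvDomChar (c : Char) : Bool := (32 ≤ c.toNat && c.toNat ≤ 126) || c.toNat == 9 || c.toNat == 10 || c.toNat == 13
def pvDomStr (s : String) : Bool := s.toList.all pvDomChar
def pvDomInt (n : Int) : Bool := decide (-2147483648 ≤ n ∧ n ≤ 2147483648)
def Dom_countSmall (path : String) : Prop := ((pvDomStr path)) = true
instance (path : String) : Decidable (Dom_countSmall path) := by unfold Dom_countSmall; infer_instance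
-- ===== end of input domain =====

-- B builds the filtered small-cave list once and compares its length with its set's length, instead of A's incremental seen-list loop with early return (objective: simpler).


-- ===== PORT A =====
-- the for-loop with the running 'small' list and the early 'return False'
def countSmallGo (small : List String) : List String → Bool
  | [] => true
  | s :: rest => if small.contains s then false else countSmallGo (small ++ [s]) rest

def countSmall (path : String) : Bool :=
  countSmallGo []
    (((PySem.Str.split? path ",").getD []).filter (fun p => p == PySem.Str.lower p && p != "start"))

-- ===== PORT B =====
def countSmall_alt (path : String) : Bool :=
  let smalls := ((PySem.Str.split? path ",").getD []).filter (fun p => p == PySem.Str.lower p && p != "start")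
  smalls.length == (PySem.Set.ofList smalls).length

-- ===== PRECONDITION & SPEC =====
def Spec_countSmall (path : String) (out : Bool) : Prop := out = countSmall_alt path
instance (path : String) (out : Bool) : Decidable (Spec_countSmall path out) := by unfold Spec_countSmall; infer_instance

-- ===== CLAIM =====
def Claim_equal_countSmall : Prop := ∀ (path : String), Dom_countSmall path → Spec_countSmall path (countSmall path)

-- ===== LEMMAS AND PROOFS =====
lemma len_ofList_eq_iff (xs : List String) :
    xs.length = (PySem.Set.ofList xs).length ↔ xs.Nodup := by
  constructor
  · intro h
    induction xs with
    | nil => simp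
    | cons x t ih =>
      rw [PySem.Set.ofList_cons] at h
      simp only [List.length_cons, Nat.succ_inj] at h
      have hdis : (PySem.Set.discard (PySem.Set.ofList t) x).length ≤ (PySem.Set.ofList t).length := by
        simp [PySem.Set.discard]
        exact List.length_filter_le _ _
      have hle := PySem.Set.length_ofList_le (xs := t)
      have heq : t.length = (PySem.Set.ofList t).length := by omega
      have hnd := ih heq
      have hself := PySem.Set.ofList_eq_self_of_nodup _ hnd
      have hxd : (PySem.Set.discard (PySem.Set.ofList t) x).length = t.length := by omega
      rw [hself] at hxd
      have hx : x ∉ t := by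
        intro hmem
        have : (PySem.Set.discard t x).length < t.length := by
          have hsub : PySem.Set.discard t x = t.filter (fun y => !(y == x)) := by
            simp [PySem.Set.discard]
          rw [hsub]
          apply List.length_filter_lt_length_iff_exists.mpr
          exact ⟨x, hmem, by simp⟩
        omega
      exact (List.nodup_cons).mpr ⟨hx, hnd⟩
  · intro h
    rw [PySem.Set.ofList_eq_self_of_nodup _ h]

lemma countSmallGo_eq (l : List String) : ∀ small : List String, small.Nodup →
    countSmallGo small l = decide (small ++ l).Nodup := by
  induction l with
  | nil => intro small h; simp [countSmallGo, h]
  | cons s rest ih =>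
    intro small h
    by_cases hs : s ∈ small
    · simp [countSmallGo, hs]
      intro hnd
      exact (List.disjoint_of_nodup_append hnd) hs (by simp)
    · have hnd : (small ++ [s]).Nodup := by
        rw [List.nodup_append]
        refine ⟨h, List.nodup_singleton s, ?_⟩
        intro a ha b hb
        rw [List.mem_singleton] at hb
        subst hb
        exact fun he => hs (he ▸ ha)
      rw [countSmallGo]
      have hc : small.contains s = false := by simpa using hs
      rw [hc]
      simp only [Bool.false_eq_true, if_false]
      rw [ih _ hnd, List.append_assoc]
      rfl

-- ===== VERDICT =====
theorem countSmall_spec : Claim_equal_countSmall := by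
  intro path _
  unfold Spec_countSmall countSmall countSmall_alt
  set xs := ((PySem.Str.split? path ",").getD []).filter (fun p => p == PySem.Str.lower p && p != "start") with hxs
  rw [countSmallGo_eq xs [] List.nodup_nil]
  simp only [List.nil_append]
  by_cases hnd : xs.Nodup
  · simp [hnd, (len_ofList_eq_iff xs).mpr hnd]
  · have hne : xs.length ≠ (PySem.Set.ofList xs).length :=
      fun he => hnd ((len_ofList_eq_iff xs).mp he)
    simp [hnd, hne]
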